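-- pv_equiv track=rewrite | github.com/minhluan96/leetcode-practice | leetcode/src/bigocoding/algorithm_complexity/approximating_a_constant_range.py | approximatingAConstantRange
-- ===== SOURCE A (Python) =====
-- def approximatingAConstantRange(n, nums):
--     windowStart = 0
--     maxLength = 0
--
--     for windowEnd in range(n):
--         if windowEnd != windowStart:
--             if abs(max(nums[windowStart:windowEnd + 1]) - min(nums[windowStart:windowEnd + 1])) > 1:
--                 windowStart += 1
--
--             maxLength = max(windowEnd - windowStart + 1, maxLength)
--
--     return maxLength
-- ===== SOURCE B (Python) =====
-- def approximatingAConstantRange(n, nums):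
--     # Sliding window with monotonic max/min deques: the per-step O(window)
--     # slice max/min scans of the original disappear; same shrink-by-one window.
--     windowStart = 0
--     maxLength = 0
--     maxDq = []  # (index, value), values strictly decreasing; front = window max
--     minDq = []  # (index, value), values strictly increasing; front = window min
--     for windowEnd in range(n):
--         x = nums[windowEnd]
--         while maxDq and maxDq[-1][1] <= x:
--             maxDq.pop()
--         maxDq.append((windowEnd, x))
--         while minDq and minDq[-1][1] >= x:
--             minDq.pop()
--         minDq.append((windowEnd, x))
--         if windowEnd != windowStart:
--             if maxDq[0][1] - minDq[0][1] > 1: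
--                 windowStart += 1
--                 if maxDq[0][0] < windowStart:
--                     maxDq = maxDq[1:]
--                 if minDq[0][0] < windowStart:
--                     minDq = minDq[1:]
--             maxLength = max(windowEnd - windowStart + 1, maxLength)
--     return maxLength
-- ===== Notes on version B (the rewrite author's own statement) =====
-- stated objective: faster
-- what changed: Replaces the per-step slice max/min rescans of the window with monotonic max/min deques maintained incrementally (amortized O(1) per step), keeping the same shrink-by-one window.
-- outside the precondition, e.g. on approximatingAConstantRange(3, [1, 1]): A returns 3, B raises IndexError
import Mathlib
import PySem

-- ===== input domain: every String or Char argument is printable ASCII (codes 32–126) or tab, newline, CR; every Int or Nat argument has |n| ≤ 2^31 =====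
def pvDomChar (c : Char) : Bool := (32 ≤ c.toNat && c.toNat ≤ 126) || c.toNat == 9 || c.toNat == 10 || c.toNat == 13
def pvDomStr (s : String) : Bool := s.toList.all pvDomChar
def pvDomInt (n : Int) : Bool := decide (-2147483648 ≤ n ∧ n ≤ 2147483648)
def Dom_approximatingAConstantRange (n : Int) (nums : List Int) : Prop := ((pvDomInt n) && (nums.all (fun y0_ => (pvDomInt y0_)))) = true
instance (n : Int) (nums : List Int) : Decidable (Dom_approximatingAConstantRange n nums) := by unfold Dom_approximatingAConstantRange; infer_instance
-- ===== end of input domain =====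

-- B replaces A's per-step slice max/min rescans with monotonic max/min deques
-- maintained incrementally across the same shrink-by-one sliding window (objective: faster).


-- ===== PORT A =====
-- loop body of A: the current window is rescanned via two slices and max/min every step
def pvStepA (nums : List Int) (st : Int × Int) (windowEnd : Int) : Int × Int :=
  if windowEnd ≠ st.1 then
    let w := PySem.List.slice nums (some st.1) (some (windowEnd + 1))
    -- max(w) / min(w): under Pre_ the slice is nonempty (st.1 ≤ windowEnd < n ≤ |nums|), so getD is unreachable
    let ws := if 1 < |((PySem.List.max? w (fun y => y)).getD 0) - ((PySem.List.min? w (fun y => y)).getD 0)|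
              then st.1 + 1 else st.1
    (ws, max (windowEnd - ws + 1) st.2)
  else st

def approximatingAConstantRange (n : Int) (nums : List Int) : Int :=
  ((PySem.List.pyRange 0 n 1).foldl (pvStepA nums) (0, 0)).2

-- ===== PORT B =====
-- `while dq and p dq[-1][1]: dq.pop()` — pop from the back of the deque while p holds
def pvPopBack (p : Int → Bool) (dq : List (Int × Int)) : List (Int × Int) :=
  (dq.reverse.dropWhile (fun v => p v.2)).reverse

-- loop body of B: state = ((windowStart, maxLength), maxDq, minDq)
def pvStepB (nums : List Int) (st : (Int × Int) × List (Int × Int) × List (Int × Int))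
    (windowEnd : Int) : (Int × Int) × List (Int × Int) × List (Int × Int) :=
  let x := PySem.List.pyGetD nums windowEnd 0  -- nums[windowEnd]; in range under Pre_
  let maxDq := pvPopBack (fun v => v ≤ x) st.2.1 ++ [(windowEnd, x)]
  let minDq := pvPopBack (fun v => x ≤ v) st.2.2 ++ [(windowEnd, x)]
  if windowEnd ≠ st.1.1 then
    let fM := PySem.List.pyGetD maxDq 0 (0, 0)   -- maxDq[0]; nonempty, an element was just appended
    let fm := PySem.List.pyGetD minDq 0 (0, 0)   -- minDq[0]
    if 1 < fM.2 - fm.2 then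
      let ws := st.1.1 + 1
      ((ws, max (windowEnd - ws + 1) st.1.2),
        (if fM.1 < ws then maxDq.drop 1 else maxDq),   -- maxDq = maxDq[1:]
        (if fm.1 < ws then minDq.drop 1 else minDq))   -- minDq = minDq[1:]
    else ((st.1.1, max (windowEnd - st.1.1 + 1) st.1.2), maxDq, minDq)
  else (st.1, maxDq, minDq)

def approximatingAConstantRange_alt (n : Int) (nums : List Int) : Int :=
  (((PySem.List.pyRange 0 n 1).foldl (pvStepB nums) ((0, 0), [], [])).1).2

-- ===== PRECONDITION & SPEC =====
-- Pre_ excludes n > len(nums): there B raises IndexError on nums[windowEnd], while A either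
-- raises ValueError (max of an empty slice) or counts phantom indices past the end of the list.
def Pre_approximatingAConstantRange (n : Int) (nums : List Int) : Prop := n ≤ (nums.length : Int)
instance (n : Int) (nums : List Int) : Decidable (Pre_approximatingAConstantRange n nums) := by
  unfold Pre_approximatingAConstantRange; infer_instance
def pvWitness_approximatingAConstantRange : Int × List Int := (3, [1, 2, 1])

def Spec_approximatingAConstantRange (n : Int) (nums : List Int) (out : Int) : Prop := out = approximatingAConstantRange_alt n nums
instance (n : Int) (nums : List Int) (out : Int) : Decidable (Spec_approximatingAConstantRange n nums out) := by unfold Spec_approximatingAConstantRange; infer_instance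

-- ===== CLAIM (what is proved, stated in full; the proofs are below) =====
def Claim_equal_approximatingAConstantRange : Prop := ∀ (n : Int) (nums : List Int), Dom_approximatingAConstantRange n nums → Pre_approximatingAConstantRange n nums → Spec_approximatingAConstantRange n nums (approximatingAConstantRange n nums)

-- ===== LEMMAS AND PROOFS =====

-- nums[i] (in-range under the invariants below)
def pvGet (nums : List Int) (i : Int) : Int := PySem.List.pyGetD nums i 0

-- index i survives in the deque for window right end e iff every later window element beats it
def pvKeep (lt : Int → Int → Bool) (nums : List Int) (e i : Int) : Bool :=
  (PySem.List.pyRange (i + 1) (e + 1) 1).all (fun j => lt (pvGet nums j) (pvGet nums i))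

-- the canonical monotonic deque for window [s, e]
def pvCanon (lt : Int → Int → Bool) (nums : List Int) (s e : Int) : List (Int × Int) :=
  ((PySem.List.pyRange s (e + 1) 1).filter (fun i => pvKeep lt nums e i)).map
    (fun i => (i, pvGet nums i))
def pvLtMax : Int → Int → Bool := fun a b => decide (a < b)
def pvLtMin : Int → Int → Bool := fun a b => decide (b < a)

theorem pvCanon_pairwise (lt : Int → Int → Bool) (nums : List Int) (s e : Int) :
    (pvCanon lt nums s e).Pairwise (fun a b => lt b.2 a.2 = true) := by
  unfold pvCanon
  rw [List.pairwise_map]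
  have h1 : (PySem.List.pyRange s (e+1) 1).Pairwise (· < ·) := PySem.List.pairwise_lt_pyRange_one s (e+1)
  have h2 : (List.filter (fun i => pvKeep lt nums e i) (PySem.List.pyRange s (e+1) 1)).Pairwise (· < ·) := h1.sublist List.filter_sublist
  refine h2.imp_of_mem ?_
  intro i i' hi hi' hlt
  have hk : pvKeep lt nums e i = true := (List.of_mem_filter hi)
  have hmem : i' ∈ PySem.List.pyRange s (e+1) 1 := List.filter_sublist.mem hi'
  have hb : i' < e + 1 := ((PySem.List.mem_pyRange_one).1 hmem).2
  unfold pvKeep at hk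
  rw [List.all_eq_true] at hk
  exact hk i' ((PySem.List.mem_pyRange_one).2 ⟨by omega, hb⟩)

theorem pvPopBack_filter (lt : Int → Int → Bool)
    (htr : ∀ a b c : Int, lt a b = true → lt b c = true → lt a c = true)
    (x : Int) (l : List (Int × Int)) (hpw : l.Pairwise (fun a b => lt b.2 a.2 = true)) :
    pvPopBack (fun v => !(lt x v)) l = l.filter (fun v => lt x v.2) := by
  induction l using List.reverseRecOn with
  | nil => rfl
  | append_singleton l' a ih =>
    have hpw' : l'.Pairwise (fun a b => lt b.2 a.2 = true) :=
      hpw.sublist (List.sublist_append_left _ _)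
    have hmem : ∀ b ∈ l', lt a.2 b.2 = true := by
      intro b hb
      have := List.pairwise_append.1 hpw
      exact this.2.2 b hb a (List.mem_singleton_self a)
    unfold pvPopBack
    rw [List.reverse_append]
    simp only [List.reverse_singleton, List.singleton_append]
    by_cases hx : lt x a.2 = true
    · rw [List.dropWhile_cons_of_neg (by simp [hx])]
      rw [List.reverse_cons, List.reverse_reverse]
      rw [List.filter_append]
      have : l'.filter (fun v => lt x v.2) = l' := by
        rw [List.filter_eq_self]
        intro b hb
        simpa using htr _ _ _ hx (hmem b hb)
      rw [this]
      simp [hx]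
    · rw [List.dropWhile_cons_of_pos (by simp [hx])]
      have := ih hpw'
      unfold pvPopBack at this
      rw [this, List.filter_append]
      simp [hx]

theorem pvKeep_last (lt : Int → Int → Bool) (nums : List Int) (e : Int) :
    pvKeep lt nums e e = true := by
  unfold pvKeep
  rw [PySem.List.pyRange_one_eq_nil (le_refl _)]
  rfl

theorem pvCanon_push (lt : Int → Int → Bool) (nums : List Int) (s e : Int) (hse : s ≤ e) :
    (pvCanon lt nums s (e - 1)).filter (fun v => lt (pvGet nums e) v.2) ++ [(e, pvGet nums e)]
      = pvCanon lt nums s e := by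
  unfold pvCanon
  have hsplit : PySem.List.pyRange s (e + 1) 1 = PySem.List.pyRange s e 1 ++ [e] := by
    exact PySem.List.pyRange_one_succ_right hse
  rw [hsplit, List.filter_append, List.map_append]
  have h1 : (List.filter (fun i => pvKeep lt nums e i) [e]) = [e] := by
    simp [pvKeep_last]
  rw [h1]
  have h2 : ((e - 1) + 1) = e := by ring
  rw [h2]
  congr 1
  rw [List.filter_map]
  rw [List.filter_filter]
  apply congrArg
  apply List.filter_congr
  intro i hi
  have hib : s ≤ i ∧ i < e := PySem.List.mem_pyRange_one.1 hi
  unfold pvKeep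
  have hsplit2 : PySem.List.pyRange (i + 1) (e + 1) 1 = PySem.List.pyRange (i + 1) e 1 ++ [e] := by
    exact PySem.List.pyRange_one_succ_right (by omega)
  rw [hsplit2, List.all_append]
  have h3 : ((e - 1) + 1) = e := by ring
  rw [h3]
  simp only [List.all_cons, List.all_nil, Bool.and_true, Function.comp]
  rw [Bool.and_comm]

theorem pvCanon_single (lt : Int → Int → Bool) (nums : List Int) (s : Int) :
    pvCanon lt nums s s = [(s, pvGet nums s)] := by
  unfold pvCanon
  rw [PySem.List.pyRange_one_singleton]
  simp [pvKeep_last]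

theorem pvCanon_head (lt : Int → Int → Bool)
    (htr : ∀ a b c : Int, lt a b = true → lt b c = true → lt a c = true)
    (hconn : ∀ a b : Int, lt a b = false → lt b a = false → a = b)
    (nums : List Int) (s e : Int) (hse : s ≤ e) :
    ∃ h t, pvCanon lt nums s e = h :: t ∧
      (∃ i, s ≤ i ∧ i ≤ e ∧ h.2 = pvGet nums i) ∧
      (∀ j, s ≤ j → j ≤ e → pvGet nums j = h.2 ∨ lt (pvGet nums j) h.2 = true) := by
  obtain ⟨k, hk⟩ : ∃ k : Nat, e = s + k := ⟨(e - s).toNat, by omega⟩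
  subst hk
  clear hse
  induction k with
  | zero =>
    refine ⟨(s, pvGet nums s), [], by simpa using pvCanon_single lt nums s, ⟨s, by omega, by omega, rfl⟩, ?_⟩
    intro j hj1 hj2
    have : j = s := by omega
    subst this; exact Or.inl rfl
  | succ k ih =>
    obtain ⟨h, t, hc, ⟨i, hi1, hi2, hiv⟩, hub⟩ := ih
    set e' : Int := s + (k + 1 : Nat) with he'
    have hee : e' - 1 = s + (k : Nat) := by push_cast [he']; ring
    set x : Int := pvGet nums e' with hx
    have hpush := pvCanon_push lt nums s e' (by push_cast [he']; omega)
    rw [hee, hc] at hpush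
    by_cases hxh : lt x h.2 = true
    · rw [List.filter_cons_of_pos (by simpa using hxh)] at hpush
      refine ⟨h, _, hpush.symm, ⟨i, hi1, by push_cast [he']; omega, hiv⟩, ?_⟩
      intro j hj1 hj2
      by_cases hj3 : j ≤ s + (k : Nat)
      · exact hub j hj1 hj3
      · have : j = e' := by push_cast [he'] at hj2 ⊢; omega
        subst this
        exact Or.inr hxh
    · rw [List.filter_cons_of_neg (by simpa using hxh)] at hpush
      have hpw := pvCanon_pairwise lt nums s (s + (k : Nat))
      rw [hc] at hpw
      have hmemt : ∀ b ∈ t, lt b.2 h.2 = true := (List.pairwise_cons.1 hpw).1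
      have htf : t.filter (fun v => lt x v.2) = [] := by
        rw [List.filter_eq_nil_iff]
        intro b hb
        simp only [Bool.not_eq_true]
        by_contra hcon
        rw [Bool.not_eq_false] at hcon
        exact absurd (htr _ _ _ hcon (hmemt b hb)) (by simpa using hxh)
      rw [htf, List.nil_append] at hpush
      refine ⟨(e', x), [], hpush.symm, ⟨e', by push_cast [he']; omega, le_refl _, rfl⟩, ?_⟩
      intro j hj1 hj2
      by_cases hj3 : j ≤ s + (k : Nat)
      · have hj4 := hub j hj1 hj3
        by_cases hhx : lt h.2 x = true
        · rcases hj4 with h1 | h1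
          · exact Or.inr (h1 ▸ hhx)
          · exact Or.inr (htr _ _ _ h1 hhx)
        · have : x = h.2 := hconn x h.2 (by simpa using hxh) (by simpa using hhx)
          rcases hj4 with h1 | h1
          · exact Or.inl (by rw [h1, this])
          · exact Or.inr (this ▸ h1)
      · have : j = e' := by push_cast [he'] at hj2 ⊢; omega
        subst this
        exact Or.inl rfl

theorem pvCanon_evict (lt : Int → Int → Bool) (nums : List Int) (s e : Int) (hse : s ≤ e)
    (h : Int × Int) (t : List (Int × Int)) (hc : pvCanon lt nums s e = h :: t) :
    (if h.1 < s + 1 then (h :: t).drop 1 else h :: t) = pvCanon lt nums (s + 1) e := by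
  have hsplit : PySem.List.pyRange s (e + 1) 1 = s :: PySem.List.pyRange (s + 1) (e + 1) 1 :=
    PySem.List.pyRange_one_cons (by omega)
  unfold pvCanon at hc ⊢
  rw [hsplit] at hc
  by_cases hks : pvKeep lt nums e s = true
  · rw [List.filter_cons_of_pos hks] at hc
    simp only [List.map_cons] at hc
    have h1 : h = (s, pvGet nums s) := ((List.cons_eq_cons.1 hc).1).symm
    have h2 := (List.cons_eq_cons.1 hc).2
    rw [if_pos (by rw [h1]; omega)]
    simpa using h2.symm
  · rw [List.filter_cons_of_neg (by simpa using hks)] at hc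
    have hmem : h ∈ (List.filter (fun i => pvKeep lt nums e i) (PySem.List.pyRange (s+1) (e+1) 1)).map (fun i => (i, pvGet nums i)) := by
      rw [hc]; exact List.mem_cons_self ..
    obtain ⟨i, hi, hpair⟩ := List.mem_map.1 hmem
    have : s + 1 ≤ i := (PySem.List.mem_pyRange_one.1 (List.mem_of_mem_filter hi)).1
    rw [if_neg (by rw [← hpair]; simpa using this)]
    exact hc.symm

theorem pvSlice_eq (nums : List Int) (s e : Int) (h0 : 0 ≤ s) (hse : s ≤ e + 1) :
    PySem.List.slice nums (some s) (some (e + 1))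
      = (nums.drop s.toNat).take ((e + 1).toNat - s.toNat) :=
  PySem.List.slice_toNat nums h0 (by omega)

theorem pvGet_mem_slice (nums : List Int) (s e j : Int) (h0 : 0 ≤ s) (hj1 : s ≤ j) (hj2 : j ≤ e)
    (he : e < (nums.length : Int)) :
    pvGet nums j ∈ PySem.List.slice nums (some s) (some (e + 1)) := by
  rw [pvSlice_eq nums s e h0 (by omega)]
  have hjl : j.toNat < nums.length := by omega
  have hg : pvGet nums j = nums[j.toNat] := by
    unfold pvGet
    exact PySem.List.pyGetD_eq_getElem nums 0 (by omega) (by omega)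
  rw [hg]
  rw [List.mem_iff_getElem]
  have hlen1 : (nums.drop s.toNat).length = nums.length - s.toNat := List.length_drop ..
  refine ⟨j.toNat - s.toNat, ?_, ?_⟩
  · rw [List.length_take, hlen1]; omega
  · rw [List.getElem_take, List.getElem_drop]
    congr 1; omega

theorem mem_slice_pvGet (nums : List Int) (s e : Int) (h0 : 0 ≤ s) (hse0 : s ≤ e)
    (he : e < (nums.length : Int))
    (v : Int) (hv : v ∈ PySem.List.slice nums (some s) (some (e + 1))) :
    ∃ j, s ≤ j ∧ j ≤ e ∧ pvGet nums j = v := by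
  · rw [pvSlice_eq nums s e h0 (by omega)] at hv
    obtain ⟨k, hk, hg⟩ := List.mem_iff_getElem.1 hv
    rw [List.length_take, List.length_drop] at hk
    rw [List.getElem_take, List.getElem_drop] at hg
    refine ⟨s + k, by omega, by omega, ?_⟩
    unfold pvGet
    rw [PySem.List.pyGetD_eq_getElem nums 0 (by omega) (by omega)]
    rw [← hg]
    congr 1
    omega


theorem pvLtMax_tr : ∀ a b c : Int, pvLtMax a b = true → pvLtMax b c = true → pvLtMax a c = true := by
  intro a b c h1 h2; simp [pvLtMax] at *; omega

theorem pvLtMax_conn : ∀ a b : Int, pvLtMax a b = false → pvLtMax b a = false → a = b := by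
  intro a b h1 h2; simp [pvLtMax] at *; omega

theorem pvLtMin_tr : ∀ a b c : Int, pvLtMin a b = true → pvLtMin b c = true → pvLtMin a c = true := by
  intro a b c h1 h2; simp [pvLtMin] at *; omega

theorem pvLtMin_conn : ∀ a b : Int, pvLtMin a b = false → pvLtMin b a = false → a = b := by
  intro a b h1 h2; simp [pvLtMin] at *; omega

theorem pvFront (nums : List Int) (s e : Int) (h0 : 0 ≤ s) (hse : s ≤ e)
    (he : e < (nums.length : Int)) :
    ∃ hM tM hm tm, pvCanon pvLtMax nums s e = hM :: tM ∧ pvCanon pvLtMin nums s e = hm :: tm ∧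
      ((PySem.List.max? (PySem.List.slice nums (some s) (some (e + 1))) (fun y => y)).getD 0 = hM.2) ∧
      ((PySem.List.min? (PySem.List.slice nums (some s) (some (e + 1))) (fun y => y)).getD 0 = hm.2) ∧
      hm.2 ≤ hM.2 := by
  obtain ⟨hM, tM, hcM, ⟨iM, hiM1, hiM2, hivM⟩, hubM⟩ := pvCanon_head pvLtMax pvLtMax_tr pvLtMax_conn nums s e hse
  obtain ⟨hm, tm, hcm, ⟨im, him1, him2, hivm⟩, hubm⟩ := pvCanon_head pvLtMin pvLtMin_tr pvLtMin_conn nums s e hse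
  have hMw : hM.2 ∈ PySem.List.slice nums (some s) (some (e + 1)) := by
    rw [hivM]; exact pvGet_mem_slice nums s e iM h0 hiM1 hiM2 he
  have hmw : hm.2 ∈ PySem.List.slice nums (some s) (some (e + 1)) := by
    rw [hivm]; exact pvGet_mem_slice nums s e im h0 him1 him2 he
  obtain ⟨M, hMs⟩ : ∃ M, PySem.List.max? (PySem.List.slice nums (some s) (some (e + 1))) (fun y => y) = some M := by
    cases hq : PySem.List.max? (PySem.List.slice nums (some s) (some (e + 1))) (fun y => y) with
    | none => exact absurd ((PySem.List.max?_eq_none_iff _ _).1 hq ▸ hMw) (List.not_mem_nil)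
    | some M => exact ⟨M, rfl⟩
  obtain ⟨m, hms⟩ : ∃ m, PySem.List.min? (PySem.List.slice nums (some s) (some (e + 1))) (fun y => y) = some m := by
    cases hq : PySem.List.min? (PySem.List.slice nums (some s) (some (e + 1))) (fun y => y) with
    | none => exact absurd ((PySem.List.min?_eq_none_iff _ _).1 hq ▸ hmw) (List.not_mem_nil)
    | some m => exact ⟨m, rfl⟩
  have hMmem := PySem.List.max?_mem hMs
  have hmmem := PySem.List.min?_mem hms
  obtain ⟨jM, hjM1, hjM2, hjMv⟩ := mem_slice_pvGet nums s e h0 hse he M hMmem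
  obtain ⟨jm, hjm1, hjm2, hjmv⟩ := mem_slice_pvGet nums s e h0 hse he m hmmem
  have hMle : M ≤ hM.2 := by
    rcases hubM jM hjM1 hjM2 with h1 | h1
    · omega
    · rw [hjMv] at h1; simp [pvLtMax] at h1; omega
  have hMge : hM.2 ≤ M := PySem.List.max?_isMax hMs hM.2 hMw
  have hmge : hm.2 ≤ m := by
    rcases hubm jm hjm1 hjm2 with h1 | h1
    · omega
    · rw [hjmv] at h1; simp [pvLtMin] at h1; omega
  have hmle : m ≤ hm.2 := PySem.List.min?_isMin hms hm.2 hmw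
  have h5 : hm.2 ≤ hM.2 := by
    have := PySem.List.min?_isMin hms hM.2 hMw
    omega
  exact ⟨hM, tM, hm, tm, hcM, hcm, by rw [hMs]; simp; omega, by rw [hms]; simp; omega, h5⟩

theorem pvPredMax (x : Int) : (fun v : Int => decide (v ≤ x)) = (fun v => !(pvLtMax x v)) := by
  funext v
  by_cases h : v ≤ x
  · simp [pvLtMax, h]
  · simp [pvLtMax, h]
    omega

theorem pvPredMin (x : Int) : (fun v : Int => decide (x ≤ v)) = (fun v => !(pvLtMin x v)) := by
  funext v
  by_cases h : x ≤ v
  · simp [pvLtMin, h]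
  · simp [pvLtMin, h]
    omega

theorem pvInv (nums : List Int) (k : Nat) (hk : (k : Int) ≤ (nums.length : Int)) :
    ((PySem.List.pyRange 0 (k : Int) 1).foldl (pvStepB nums) ((0, 0), [], [])
      = (((PySem.List.pyRange 0 (k : Int) 1).foldl (pvStepA nums) (0, 0)),
          pvCanon pvLtMax nums ((PySem.List.pyRange 0 (k : Int) 1).foldl (pvStepA nums) (0, 0)).1 ((k : Int) - 1),
          pvCanon pvLtMin nums ((PySem.List.pyRange 0 (k : Int) 1).foldl (pvStepA nums) (0, 0)).1 ((k : Int) - 1)))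
    ∧ 0 ≤ ((PySem.List.pyRange 0 (k : Int) 1).foldl (pvStepA nums) (0, 0)).1
    ∧ ((PySem.List.pyRange 0 (k : Int) 1).foldl (pvStepA nums) (0, 0)).1 ≤ max ((k : Int) - 1) 0 := by
  induction k with
  | zero =>
    have hnil : PySem.List.pyRange 0 ((0 : Nat) : Int) 1 = [] := by
      rw [Nat.cast_zero]; exact PySem.List.pyRange_one_eq_nil (le_refl 0)
    have hcnil : ∀ lt, pvCanon lt nums 0 (((0 : Nat) : Int) - 1) = [] := by
      intro lt
      unfold pvCanon
      rw [Nat.cast_zero, PySem.List.pyRange_one_eq_nil (by omega)]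
      rfl
    rw [hnil]
    simp only [List.foldl_nil, Nat.cast_zero]
    refine ⟨?_, by norm_num, by norm_num⟩
    have h1 := hcnil pvLtMax
    have h2 := hcnil pvLtMin
    rw [Nat.cast_zero] at h1 h2
    rw [h1, h2]
  | succ k ih =>
    have hk' : (k : Int) ≤ (nums.length : Int) := by push_cast at hk ⊢; omega
    obtain ⟨ihB, ihb0, ihb1⟩ := ih hk'
    set FA := (PySem.List.pyRange 0 (k : Int) 1).foldl (pvStepA nums) (0, 0) with hFA
    have hse : FA.1 ≤ (k : Int) := by
      rcases le_max_iff.1 ihb1 with h | h <;> omega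
    have he : (k : Int) < (nums.length : Int) := by push_cast at hk; omega
    have hcast : ((k + 1 : Nat) : Int) = (k : Int) + 1 := by push_cast; ring
    have hsplit : PySem.List.pyRange 0 ((k + 1 : Nat) : Int) 1
        = PySem.List.pyRange 0 (k : Int) 1 ++ [(k : Int)] := by
      rw [hcast]; exact PySem.List.pyRange_one_succ_right (Int.natCast_nonneg k)
    rw [hsplit]
    simp only [List.foldl_append, List.foldl_cons, List.foldl_nil]
    rw [ihB, ← hFA]
    have hcast2 : ((k + 1 : Nat) : Int) - 1 = (k : Int) := by push_cast; ring
    rw [hcast2]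
    -- unfold one step of both loops
    simp only [pvStepA, pvStepB]
    have hmaxpush : pvPopBack (fun v => decide (v ≤ PySem.List.pyGetD nums (k : Int) 0)) (pvCanon pvLtMax nums FA.1 ((k : Int) - 1)) ++ [((k : Int), PySem.List.pyGetD nums (k : Int) 0)] = pvCanon pvLtMax nums FA.1 (k : Int) := by
      rw [pvPredMax, pvPopBack_filter pvLtMax pvLtMax_tr _ _ (pvCanon_pairwise pvLtMax nums FA.1 ((k : Int) - 1))]
      exact pvCanon_push pvLtMax nums FA.1 (k : Int) hse
    have hminpush : pvPopBack (fun v => decide (PySem.List.pyGetD nums (k : Int) 0 ≤ v)) (pvCanon pvLtMin nums FA.1 ((k : Int) - 1)) ++ [((k : Int), PySem.List.pyGetD nums (k : Int) 0)] = pvCanon pvLtMin nums FA.1 (k : Int) := by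
      rw [pvPredMin, pvPopBack_filter pvLtMin pvLtMin_tr _ _ (pvCanon_pairwise pvLtMin nums FA.1 ((k : Int) - 1))]
      exact pvCanon_push pvLtMin nums FA.1 (k : Int) hse
    rw [hmaxpush, hminpush]
    by_cases hke : ((k : Int) : Int) ≠ FA.1
    · have hslt : FA.1 < (k : Int) := by omega
      obtain ⟨hM, tM, hm, tm, hcM, hcm, hMeq, hmeq, hmle⟩ :=
        pvFront nums FA.1 (k : Int) ihb0 hse he
      simp only [if_pos hke, hcM, hcm, PySem.List.pyGetD_zero_cons, hMeq, hmeq]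
      have habs : |hM.2 - hm.2| = hM.2 - hm.2 := abs_of_nonneg (by omega)
      rw [habs]
      by_cases hcond : 1 < hM.2 - hm.2
      · simp only [if_pos hcond]
        have hev1 := pvCanon_evict pvLtMax nums FA.1 (k : Int) hse hM tM hcM
        have hev2 := pvCanon_evict pvLtMin nums FA.1 (k : Int) hse hm tm hcm
        refine ⟨?_, by omega, ?_⟩
        · rw [hev1, hev2]
        · exact le_max_of_le_left (by omega)
      · simp only [if_neg hcond]
        refine ⟨by rw [hcM, hcm], by omega, ?_⟩
        exact le_max_of_le_left (by omega)
    · rw [not_ne_iff] at hke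
      simp only [hke, ne_eq, not_true_eq_false, if_false]
      refine ⟨by trivial, by omega, ?_⟩
      exact le_max_of_le_left (by omega)

-- ===== VERDICT (by name: the statement is the Claim_ definition above) =====
theorem approximatingAConstantRange_spec : Claim_equal_approximatingAConstantRange := by
  intro n nums _hdom hpre
  unfold Spec_approximatingAConstantRange
  unfold Pre_approximatingAConstantRange at hpre
  by_cases hn : n ≤ 0
  · simp [approximatingAConstantRange, approximatingAConstantRange_alt,
      PySem.List.pyRange_one_eq_nil hn]
  · have h0 : ((n.toNat : Int)) = n := Int.toNat_of_nonneg (by omega)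
    have := (pvInv nums n.toNat (by omega)).1
    rw [h0] at this
    unfold approximatingAConstantRange approximatingAConstantRange_alt
    rw [this]
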